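-- pv_equiv track=rewrite | github.com/Nostoi/rom24-quickmud-python | mud/persistence.py | translate_legacy_affect_bits
-- ===== SOURCE A (Python) =====
-- _AFFECT_BIT_TRANSLATION: dict[int, int] = {
--     6: 7,    # SANCTUARY
--     7: 8,    # FAERIE_FIRE
--     8: 9,    # INFRARED
--     9: 10,   # CURSE
--     10: 6,   # DETECT_GOOD
--     11: 12,  # POISON (legacy bit 11 → ROM bit M=12; old bit 11 vacated)
--     12: 13,  # PROTECT_EVIL
--     13: 14,  # PROTECT_GOOD
--     14: 15,  # SNEAK
--     15: 16,  # HIDE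
--     16: 17,  # SLEEP
--     17: 18,  # CHARM
--     18: 19,  # FLYING
--     19: 20,  # PASS_DOOR
--     20: 24,  # WEAKEN
--     21: 26,  # BERSERK
--     23: 21,  # HASTE
--     24: 29,  # SLOW
--     25: 23,  # PLAGUE
--     26: 25,  # DARK_VISION
-- }
--
-- def translate_legacy_affect_bits(value: int) -> int:
--     """Translate a pre-TABLES-001 AffectFlag int to ROM-canonical bits.
--
--     Used during pfile load when pfile_version < 1. See mud/models/constants.py
--     AffectFlag and ROM src/merc.h:953-982 for the canonical bit layout.
--     """
--     if not value:
--         return 0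
--     result = 0
--     for bit_index in range(30):
--         if value & (1 << bit_index):
--             new_bit = _AFFECT_BIT_TRANSLATION.get(bit_index, bit_index)
--             result |= 1 << new_bit
--     return result
-- ===== SOURCE B (Python) =====
-- _AFFECT_BIT_TRANSLATION: dict[int, int] = {
--     6: 7, 7: 8, 8: 9, 9: 10, 10: 6, 11: 12, 12: 13, 13: 14, 14: 15,
--     15: 16, 16: 17, 17: 18, 18: 19, 19: 20, 20: 24, 21: 26, 23: 21,
--     24: 29, 25: 23, 26: 25,
-- }
--
--
-- def translate_legacy_affect_bits(value: int) -> int: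
--     """Translate a pre-TABLES-001 AffectFlag int to ROM-canonical bits."""
--     if not value:
--         return 0
--     # Reduce to the low 30 bits once (= A's range(30) cutoff), then walk
--     # only the set bits from the top instead of scanning all 30 positions.
--     v = value & ((1 << 30) - 1)
--     result = 0
--     while v:
--         idx = v.bit_length() - 1
--         result |= 1 << _AFFECT_BIT_TRANSLATION.get(idx, idx)
--         v ^= 1 << idx
--     return result
-- ===== Notes on version B (the rewrite author's own statement) =====
-- stated objective: idiomatic
-- what changed: Instead of scanning all 30 bit positions, B masks the input to its low 30 bits once and then walks only the set bits (highest first via bit_length), clearing each as it goes.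
import Mathlib
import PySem

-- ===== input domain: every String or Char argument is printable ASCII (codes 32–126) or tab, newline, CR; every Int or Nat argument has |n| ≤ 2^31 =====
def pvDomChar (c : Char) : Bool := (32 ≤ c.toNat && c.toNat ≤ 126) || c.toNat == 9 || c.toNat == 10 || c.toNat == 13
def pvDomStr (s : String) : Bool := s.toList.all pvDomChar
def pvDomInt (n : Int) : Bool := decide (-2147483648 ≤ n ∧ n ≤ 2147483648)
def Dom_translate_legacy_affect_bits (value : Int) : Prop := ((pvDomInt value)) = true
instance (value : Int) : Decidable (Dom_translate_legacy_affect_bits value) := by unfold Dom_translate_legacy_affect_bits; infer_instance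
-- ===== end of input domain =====

-- B masks to the low 30 bits once and walks only the set bits (top first) instead of scanning
-- all 30 positions; same result, more idiomatic bit-walk (objective: idiomatic/alternative).

-- ===== PORT A =====
def affectTbl : PySem.Dict Int Int := PySem.Dict.ofList
  [(6,7),(7,8),(8,9),(9,10),(10,6),(11,12),(12,13),(13,14),(14,15),(15,16),
   (16,17),(17,18),(18,19),(19,20),(20,24),(21,26),(23,21),(24,29),(25,23),(26,25)]

def translate_legacy_affect_bits (value : Int) : Int :=
  if value = 0 then 0
  else
    (List.range 30).foldl (fun result (bit_index : Nat) =>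
      if PySem.Int.band value ((1:Int) <<< bit_index) ≠ 0 then
        -- new_bit is one of 0..29, so `.toNat` in the shift amount is exact
        let new_bit := PySem.Dict.getD affectTbl (bit_index : Int) (bit_index : Int)
        PySem.Int.bor result ((1:Int) <<< new_bit.toNat)
      else result) 0

-- ===== PORT B =====
-- termination helper for the `while v:` loop (cited by `decreasing_by` below)
theorem pvXorTopLt (v : Nat) (hv0 : v ≠ 0) :
    v ^^^ (1 <<< (PySem.Int.bitLength (v:Int) - 1)) < v := by
  set idx := PySem.Int.bitLength (v:Int) - 1 with hidx
  have hvInt : (v:Int) ≠ 0 := by exact_mod_cast hv0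
  have hL1 : 1 ≤ PySem.Int.bitLength (v:Int) := by
    by_contra hc
    have h0 : PySem.Int.bitLength (v:Int) = 0 := by omega
    have := PySem.Int.lt_two_pow_bitLength (v:Int)
    rw [h0] at this
    simp [Int.natAbs_natCast] at this
    omega
  have hle : 2 ^ idx ≤ v := by
    have := PySem.Int.two_pow_bitLength_le (v:Int) hvInt
    simpa [hidx, Int.natAbs_natCast] using this
  have hlt : v < 2 ^ (idx + 1) := by
    have := PySem.Int.lt_two_pow_bitLength (v:Int)
    have hE : idx + 1 = PySem.Int.bitLength (v:Int) := by omega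
    rw [hE]
    simpa [Int.natAbs_natCast] using this
  have hclear : v ^^^ (1 <<< idx) < 2 ^ idx := by
    rw [Nat.one_shiftLeft]
    apply Nat.lt_pow_two_of_testBit
    intro i hi
    rw [Nat.testBit_xor, Nat.testBit_two_pow]
    rcases eq_or_lt_of_le hi with hEq | hlt'
    · rw [← hEq]
      have hdiv : v / 2 ^ idx = 1 := by
        have h1 : 1 ≤ v / 2 ^ idx := (Nat.le_div_iff_mul_le (Nat.two_pow_pos idx)).mpr (by simpa using hle)
        have h2 : v / 2 ^ idx < 2 := (Nat.div_lt_iff_lt_mul (Nat.two_pow_pos idx)).mpr (by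
          have : 2 * 2 ^ idx = 2 ^ (idx+1) := by ring
          omega)
        omega
      rw [Nat.testBit_eq_decide_div_mod_eq, hdiv]
      simp
    · have hvb : v.testBit i = false := Nat.testBit_eq_false_of_lt (by
        calc v < 2 ^ (idx + 1) := hlt
        _ ≤ 2 ^ i := Nat.pow_le_pow_right (by norm_num) (by omega))
      have : idx ≠ i := by omega
      simp [hvb, this]
  exact lt_of_lt_of_le hclear hle

def altLoop (v : Nat) (result : Int) : Int :=
  if h : v = 0 then result
  else
    let idx : Nat := PySem.Int.bitLength (v:Int) - 1            -- v.bit_length() - 1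
    let new_bit := PySem.Dict.getD affectTbl (idx : Int) (idx : Int)
    altLoop (v ^^^ (1 <<< idx)) (PySem.Int.bor result ((1:Int) <<< new_bit.toNat))
termination_by v
decreasing_by exact pvXorTopLt v h

def translate_legacy_affect_bits_alt (value : Int) : Int :=
  if value = 0 then 0
  else
    -- v = value & ((1 << 30) - 1); the masked value is nonnegative, held as a Nat (.toNat exact)
    altLoop (PySem.Int.band value (((1:Int) <<< 30) - 1)).toNat 0

-- ===== PRECONDITION & SPEC =====
def Spec_translate_legacy_affect_bits (value : Int) (out : Int) : Prop := out = translate_legacy_affect_bits_alt value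
instance (value : Int) (out : Int) : Decidable (Spec_translate_legacy_affect_bits value out) := by unfold Spec_translate_legacy_affect_bits; infer_instance

-- ===== CLAIM (what is proved, stated in full; the proofs are below) =====
def Claim_equal_translate_legacy_affect_bits : Prop := ∀ (value : Int), Dom_translate_legacy_affect_bits value → Spec_translate_legacy_affect_bits value (translate_legacy_affect_bits value)

-- ===== LEMMAS AND PROOFS =====

-- the translated bit for index i (shared shape of both ports' shift amount)
def tN (i : Nat) : Nat := (PySem.Dict.getD affectTbl (i : Int) (i : Int)).toNat

-- the common Nat-level fold both ports are reduced to
def gFold (c : Nat → Bool) (rn : Nat) : Nat :=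
  (List.range 30).foldl (fun r i => if c i then r ||| (1 <<< tN i) else r) rn

-- complement-under-mask: bits of (2^k - 1 - x) are the flipped bits of x below k
theorem pvComplTestBit : ∀ (i k x : Nat), x < 2 ^ k →
    (2 ^ k - 1 - x).testBit i = (decide (i < k) && !x.testBit i) := by
  intro i
  induction i with
  | zero =>
    intro k x hx
    cases k with
    | zero => simp_all
    | succ j =>
      have hp : 0 < 2 ^ j := Nat.two_pow_pos j
      have h2 : 2 ^ (j+1) = 2 * 2 ^ j := by ring
      rw [Nat.testBit_zero, Nat.testBit_zero]
      rw [h2] at hx ⊢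
      have hm : (2 * 2 ^ j - 1 - x) % 2 = 1 - x % 2 := by omega
      rcases Nat.mod_two_eq_zero_or_one x with h | h <;> simp [hm, h]
  | succ i ih =>
    intro k x hx
    cases k with
    | zero =>
      have : x = 0 := by omega
      simp [this]
    | succ j =>
      have hp : 0 < 2 ^ j := Nat.two_pow_pos j
      have h2 : 2 ^ (j+1) = 2 * 2 ^ j := by ring
      have hdiv : (2 ^ (j+1) - 1 - x) / 2 = 2 ^ j - 1 - x / 2 := by
        rw [h2] at hx ⊢; omega
      rw [Nat.testBit_succ, Nat.testBit_succ, hdiv, ih j (x / 2) (by rw [h2] at hx; omega)]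
      simp

-- Python's `value & (1 << i)` test agrees with testBit of the 30-bit-masked value
theorem pvBitAgree (value : Int) (i : Nat) (hi : i < 30) :
    (PySem.Int.band value ((1:Int) <<< i) ≠ 0) ↔
      ((PySem.Int.band value (((1:Int) <<< 30) - 1)).toNat.testBit i = true) := by
  have hsh : ((1:Int) <<< i) = ((2 ^ i : Nat) : Int) := by
    rw [Int.shiftLeft_eq]; push_cast; ring
  have hmask : (((1:Int) <<< 30) - 1) = ((2 ^ 30 - 1 : Nat) : Int) := by decide
  rw [hsh, hmask]
  by_cases hv : 0 ≤ value
  · obtain ⟨m, rfl⟩ := Int.eq_ofNat_of_zero_le hv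
    rw [PySem.Int.band_natCast, PySem.Int.band_natCast]
    rw [Nat.and_two_pow_sub_one_eq_mod, Nat.and_two_pow]
    simp only [Int.toNat_natCast, Nat.testBit_mod_two_pow, hi, decide_true, Bool.true_and]
    constructor
    · intro h
      rcases hb : m.testBit i with _ | _
      · simp [hb] at h
      · rfl
    · intro h
      have : (m.testBit i).toNat = 1 := by rw [h]; rfl
      rw [this]
      have : 0 < 2 ^ i := Nat.two_pow_pos i
      exact_mod_cast Nat.one_mul (2^i) ▸ (by positivity : (0:Int) < ((2:Nat)^i : Nat)) |>.ne'
  · rw [Int.not_le] at hv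
    set m : Nat := (-value - 1).toNat with hm
    have hval : value = -(m : Int) - 1 := by simp [hm]; omega
    have hbandPow : PySem.Int.band value ((2 ^ i : Nat) : Int)
        = ((2 ^ i - ((m.testBit i).toNat * 2 ^ i) : Nat) : Int) := by
      unfold PySem.Int.band
      have h1 : ¬ 0 ≤ value := by omega
      have h2 : (0:Int) ≤ ((2 ^ i : Nat) : Int) := by positivity
      simp only [h1, h2, if_true, if_false]
      congr 1
      rw [Int.toNat_natCast]
      rw [show (-value - 1).toNat = m from rfl]
      rw [Nat.and_comm, Nat.and_two_pow]
    have hbandMask : PySem.Int.band value ((2 ^ 30 - 1 : Nat) : Int)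
        = ((2 ^ 30 - 1 - m % 2 ^ 30 : Nat) : Int) := by
      unfold PySem.Int.band
      have h1 : ¬ 0 ≤ value := by omega
      have h2 : (0:Int) ≤ ((2 ^ 30 - 1 : Nat) : Int) := by positivity
      simp only [h1, h2, if_true, if_false]
      congr 1
      rw [Int.toNat_natCast]
      rw [show (-value - 1).toNat = m from rfl]
      rw [Nat.and_comm, Nat.and_two_pow_sub_one_eq_mod]
    rw [hbandPow, hbandMask]
    have hmlt : m % 2 ^ 30 < 2 ^ 30 := Nat.mod_lt _ (by norm_num)
    rw [Int.toNat_natCast, pvComplTestBit i 30 (m % 2^30) hmlt]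
    simp only [hi, decide_true, Bool.true_and, Nat.testBit_mod_two_pow]
    have hpow : 0 < 2 ^ i := Nat.two_pow_pos i
    rw [Ne, Int.natCast_eq_zero]
    rcases m.testBit i with _ | _
    · simp
    · simp

-- pushing `||| x` on the accumulator out of the fold
theorem pvOrFold (c : Nat → Bool) :
    ∀ (l : List Nat) (rn x : Nat),
      l.foldl (fun r i => if c i then r ||| (1 <<< tN i) else r) (rn ||| x)
        = (l.foldl (fun r i => if c i then r ||| (1 <<< tN i) else r) rn) ||| x := by
  intro l
  induction l with
  | nil => intro rn x; rfl
  | cons a l ih =>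
    intro rn x
    simp only [List.foldl_cons]
    rcases h : c a with _ | _
    · simp [ih]
    · simp only [if_true]
      rw [Nat.lor_assoc, Nat.lor_comm x _, ← Nat.lor_assoc, ih]

-- the fold over conditions differing exactly at one (distinct) index
theorem pvDiffFold (c1 c2 : Nat → Bool) (idx : Nat)
    (h1 : c1 idx = true) (h2 : c2 idx = false) (hne : ∀ i, i ≠ idx → c1 i = c2 i) :
    ∀ (l : List Nat), l.Nodup → idx ∈ l → ∀ rn,
      l.foldl (fun r i => if c1 i then r ||| (1 <<< tN i) else r) rn
        = (l.foldl (fun r i => if c2 i then r ||| (1 <<< tN i) else r) rn) ||| (1 <<< tN idx) := by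
  intro l
  induction l with
  | nil => intro _ h; cases h
  | cons a l ih =>
    intro hnd hmem rn
    rcases List.nodup_cons.mp hnd with ⟨hna, hndl⟩
    by_cases ha : a = idx
    · subst ha
      simp only [List.foldl_cons, h1, h2, if_true]
      rw [PySem.List.foldl_congr_mem l _ (fun r i => if c2 i then r ||| (1 <<< tN i) else r) _
        (by intro acc x hx; rw [hne x (by rintro rfl; exact hna hx)])]
      exact pvOrFold c2 l rn (1 <<< tN a)
    · have hmem' : idx ∈ l := by
        rcases List.mem_cons.mp hmem with h | h
        · exact absurd h.symm ha
        · exact h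
      simp only [List.foldl_cons, hne a ha]
      exact ih hndl hmem' _

-- top-bit facts for a nonzero v < 2^30
theorem pvTopFacts (v : Nat) (h : v ≠ 0) (hlt30 : v < 2 ^ 30) :
    let idx := PySem.Int.bitLength (v:Int) - 1
    v.testBit idx = true ∧ idx < 30 ∧ v ^^^ (1 <<< idx) < 2 ^ idx := by
  intro idx
  have hvInt : (v:Int) ≠ 0 := by exact_mod_cast h
  have hL1 : 1 ≤ PySem.Int.bitLength (v:Int) := by
    by_contra hc
    have h0 : PySem.Int.bitLength (v:Int) = 0 := by omega
    have := PySem.Int.lt_two_pow_bitLength (v:Int)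
    rw [h0] at this
    simp [Int.natAbs_natCast] at this
    omega
  have hle : 2 ^ idx ≤ v := by
    have := PySem.Int.two_pow_bitLength_le (v:Int) hvInt
    simpa [idx, Int.natAbs_natCast] using this
  have hltv : v < 2 ^ (idx + 1) := by
    have := PySem.Int.lt_two_pow_bitLength (v:Int)
    have hE : idx + 1 = PySem.Int.bitLength (v:Int) := by omega
    rw [hE]
    simpa [Int.natAbs_natCast] using this
  have htop : v.testBit idx = true := by
    have hdiv : v / 2 ^ idx = 1 := by
      have h1 : 1 ≤ v / 2 ^ idx := (Nat.le_div_iff_mul_le (Nat.two_pow_pos idx)).mpr (by simpa using hle)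
      have h2 : v / 2 ^ idx < 2 := (Nat.div_lt_iff_lt_mul (Nat.two_pow_pos idx)).mpr (by
        have : 2 * 2 ^ idx = 2 ^ (idx+1) := by ring
        omega)
      omega
    rw [Nat.testBit_eq_decide_div_mod_eq, hdiv]
    simp
  have hidx30 : idx < 30 := by
    have : 2 ^ idx < 2 ^ 30 := lt_of_le_of_lt hle hlt30
    exact (Nat.pow_lt_pow_iff_right (by norm_num)).mp this
  have hclear : v ^^^ (1 <<< idx) < 2 ^ idx := by
    rw [Nat.one_shiftLeft]
    apply Nat.lt_pow_two_of_testBit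
    intro i hi
    rw [Nat.testBit_xor, Nat.testBit_two_pow]
    rcases eq_or_lt_of_le hi with hEq | hlt'
    · rw [← hEq]
      simp [htop]
    · have hvb : v.testBit i = false := Nat.testBit_eq_false_of_lt (by
        calc v < 2 ^ (idx + 1) := hltv
        _ ≤ 2 ^ i := Nat.pow_le_pow_right (by norm_num) (by omega))
      have : idx ≠ i := by omega
      simp [hvb, this]
  exact ⟨htop, hidx30, hclear⟩

-- B's loop computes the common fold
theorem pvLoopEq : ∀ (v : Nat), v < 2 ^ 30 → ∀ (rn : Nat),
    altLoop v (rn : Int) = ((gFold v.testBit rn : Nat) : Int) := by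
  intro v
  induction v using Nat.strong_induction_on with
  | _ v ih =>
    intro hlt rn
    by_cases h : v = 0
    · subst h
      have hz : gFold (Nat.testBit 0) rn = rn := by
        unfold gFold
        rw [PySem.List.foldl_congr_mem _ _ (fun r _ => r) _ (by intro acc x _; simp [Nat.zero_testBit])]
        simp
      rw [altLoop, hz]
      simp
    · obtain ⟨htop, hidx30, hclear⟩ := pvTopFacts v h hlt
      set idx := PySem.Int.bitLength (v:Int) - 1 with hidxdef
      set v' := v ^^^ (1 <<< idx) with hv'
      have hv'lt : v' < v := pvXorTopLt v h
      have hv'30 : v' < 2 ^ 30 := lt_of_lt_of_le hclear (Nat.pow_le_pow_right (by norm_num) (le_of_lt hidx30))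
      rw [altLoop]
      simp only [dif_neg h]
      have hcast : PySem.Int.bor (rn : Int) ((1:Int) <<< (PySem.Dict.getD affectTbl (idx:Int) (idx:Int)).toNat)
          = ((rn ||| (1 <<< tN idx) : Nat) : Int) := by
        have hsh : ((1:Int) <<< tN idx) = (((1 <<< tN idx : Nat)) : Int) := by
          rw [Int.shiftLeft_eq, Nat.one_shiftLeft]; push_cast; ring
        rw [show (PySem.Dict.getD affectTbl (idx:Int) (idx:Int)).toNat = tN idx from rfl, hsh,
          PySem.Int.bor_natCast]
      rw [hcast, ih v' hv'lt hv'30 (rn ||| (1 <<< tN idx))]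
      congr 1
      have hbit : ∀ i, v'.testBit i = (v.testBit i ^^ decide (idx = i)) := by
        intro i
        rw [hv', Nat.one_shiftLeft, Nat.testBit_xor, Nat.testBit_two_pow]
      unfold gFold
      rw [pvDiffFold (Nat.testBit v) (Nat.testBit v') idx htop
        (by rw [hbit]; simp [htop])
        (by intro i hi; rw [hbit]; have hne' : idx ≠ i := fun hh => hi hh.symm; simp [hne'])
        (List.range 30) (List.nodup_range) (List.mem_range.mpr hidx30) rn]
      exact pvOrFold _ _ _ _

-- A's scan computes the common fold
theorem pvScanEq (value : Int) :
    ∀ (l : List Nat), (∀ i ∈ l, i < 30) → ∀ (rn : Nat),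
      l.foldl (fun result (bit_index : Nat) =>
        if PySem.Int.band value ((1:Int) <<< bit_index) ≠ 0 then
          PySem.Int.bor result ((1:Int) <<< (PySem.Dict.getD affectTbl (bit_index : Int) (bit_index : Int)).toNat)
        else result) (rn : Int)
      = ((l.foldl (fun r i =>
            if (PySem.Int.band value (((1:Int) <<< 30) - 1)).toNat.testBit i then r ||| (1 <<< tN i) else r) rn : Nat) : Int) := by
  intro l
  induction l with
  | nil => intro _ rn; rfl
  | cons a l ih =>
    intro hb rn
    have ha : a < 30 := hb a (List.mem_cons_self ..)
    simp only [List.foldl_cons]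
    by_cases hc : PySem.Int.band value ((1:Int) <<< a) ≠ 0
    · have htb : (PySem.Int.band value (((1:Int) <<< 30) - 1)).toNat.testBit a = true :=
        (pvBitAgree value a ha).mp hc
      rw [if_pos hc]
      have hcast : PySem.Int.bor (rn : Int) ((1:Int) <<< (PySem.Dict.getD affectTbl (a:Int) (a:Int)).toNat)
          = ((rn ||| (1 <<< tN a) : Nat) : Int) := by
        have hsh : ((1:Int) <<< tN a) = (((1 <<< tN a : Nat)) : Int) := by
          rw [Int.shiftLeft_eq, Nat.one_shiftLeft]; push_cast; ring
        rw [show (PySem.Dict.getD affectTbl (a:Int) (a:Int)).toNat = tN a from rfl, hsh,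
          PySem.Int.bor_natCast]
      rw [hcast, ih (fun i hi => hb i (List.mem_cons_of_mem a hi)), htb]
      simp
    · have htb : (PySem.Int.band value (((1:Int) <<< 30) - 1)).toNat.testBit a = false := by
        rcases hx : (PySem.Int.band value (((1:Int) <<< 30) - 1)).toNat.testBit a with _ | _
        · rfl
        · exact absurd ((pvBitAgree value a ha).mpr hx) hc
      rw [if_neg hc, ih (fun i hi => hb i (List.mem_cons_of_mem a hi)), htb]
      simp

-- the masked value is below 2^30
theorem pvMaskLt (value : Int) :
    (PySem.Int.band value (((1:Int) <<< 30) - 1)).toNat < 2 ^ 30 := by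
  have hmask : (((1:Int) <<< 30) - 1) = ((2 ^ 30 - 1 : Nat) : Int) := by decide
  rw [hmask]
  by_cases hv : 0 ≤ value
  · obtain ⟨m, rfl⟩ := Int.eq_ofNat_of_zero_le hv
    rw [PySem.Int.band_natCast, Nat.and_two_pow_sub_one_eq_mod, Int.toNat_natCast]
    exact Nat.mod_lt _ (by norm_num)
  · rw [Int.not_le] at hv
    unfold PySem.Int.band
    have h1 : ¬ 0 ≤ value := by omega
    have h2 : (0:Int) ≤ ((2 ^ 30 - 1 : Nat) : Int) := by positivity
    simp only [h1, h2, if_true, if_false, Int.toNat_natCast]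
    have := Nat.sub_le (2 ^ 30 - 1) ((2 ^ 30 - 1) &&& (-value - 1).toNat)
    omega

-- ===== VERDICT (by name: the statement is the Claim_ definition above) =====
theorem translate_legacy_affect_bits_spec : Claim_equal_translate_legacy_affect_bits := by
  intro value _
  unfold Spec_translate_legacy_affect_bits
  unfold translate_legacy_affect_bits translate_legacy_affect_bits_alt
  by_cases h0 : value = 0
  · simp [h0]
  · rw [if_neg h0, if_neg h0]
    have hA := pvScanEq value (List.range 30) (fun i hi => List.mem_range.mp hi) 0
    have hB := pvLoopEq _ (pvMaskLt value) 0
    simp only [Nat.cast_zero] at hA hB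
    rw [hA, hB]
    rfl
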